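-- pv_equiv track=rewrite | github.com/MikayelB/Learning_Python | CS EX/sum_of_digits.py | doesContainDigit
-- ===== SOURCE A (Python) =====
-- def doesContainDigit(number, digit):
--     duplicate1 = number
--     while duplicate1 > 0:
--         remainder1 = duplicate1 % 10
--         if remainder1 == digit:
--             return True
--         duplicate1 = duplicate1 // 10
--     return False
-- ===== SOURCE B (Python) =====
-- def doesContainDigit(number, digit):
--     # Idiomatic rewrite: scan the decimal string representation instead of
--     # peeling digits with % 10 // 10 in a while loop.
--     if number <= 0:
--         return False
--     return any(int(ch) == digit for ch in str(number))
-- ===== Notes on version B (the rewrite author's own statement) =====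
-- stated objective: idiomatic
-- what changed: B obtains the digits from str(number) and scans its characters with any(int(ch) == digit ...) instead of A's while loop peeling digits with % 10 and // 10.
import Mathlib
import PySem

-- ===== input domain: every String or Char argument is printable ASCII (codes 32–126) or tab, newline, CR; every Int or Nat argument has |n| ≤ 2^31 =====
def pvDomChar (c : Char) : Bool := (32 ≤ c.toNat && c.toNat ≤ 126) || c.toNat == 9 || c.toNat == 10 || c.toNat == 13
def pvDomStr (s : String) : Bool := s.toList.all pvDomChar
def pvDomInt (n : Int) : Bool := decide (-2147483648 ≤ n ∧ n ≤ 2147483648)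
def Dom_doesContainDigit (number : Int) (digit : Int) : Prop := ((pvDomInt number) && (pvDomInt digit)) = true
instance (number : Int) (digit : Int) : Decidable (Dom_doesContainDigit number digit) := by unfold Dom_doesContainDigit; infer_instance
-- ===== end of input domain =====

-- B finds the digits via the decimal string representation (str(number) scanned with any)
-- instead of A's while loop peeling digits with % 10 and // 10; same cost, more idiomatic.


-- ===== PORT A =====
-- the while loop of A: peel digits with % 10 // 10, early-return True on a match
def pvLoopA (duplicate1 : Int) (digit : Int) : Bool :=
  if _h : duplicate1 > 0 then
    if PySem.Int.mod duplicate1 10 = digit then true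
    else pvLoopA (PySem.Int.floordiv duplicate1 10) digit
  else false
termination_by duplicate1.toNat
decreasing_by
  rw [PySem.Int.floordiv_eq_ediv_of_pos (by omega)]
  omega

def doesContainDigit (number : Int) (digit : Int) : Bool := pvLoopA number digit

-- ===== PORT B =====
-- int(ch) is ported as ch.toNat - 48: exact here, since for number > 0 every
-- character of str(number) is one of '0'..'9'.
def doesContainDigit_alt (number : Int) (digit : Int) : Bool :=
  if number ≤ 0 then false
  else (PySem.Int.toStr number).toList.any (fun ch => decide (((ch.toNat : Int) - 48) = digit))

-- ===== PRECONDITION & SPEC =====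
def Spec_doesContainDigit (number : Int) (digit : Int) (out : Bool) : Prop := out = doesContainDigit_alt number digit
instance (number : Int) (digit : Int) (out : Bool) : Decidable (Spec_doesContainDigit number digit out) := by unfold Spec_doesContainDigit; infer_instance

-- ===== CLAIM (what is proved, stated in full; the proofs are below) =====
def Claim_equal_doesContainDigit : Prop := ∀ (number : Int) (digit : Int), Dom_doesContainDigit number digit → Spec_doesContainDigit number digit (doesContainDigit number digit)

-- ===== LEMMAS AND PROOFS =====

-- fuel irrelevance + accumulator law for Nat.toDigitsCore at base 10
lemma pv_toDigitsCore_eq (m : Nat) : ∀ (f : Nat) (acc : List Char), m < f →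
    Nat.toDigitsCore 10 f m acc = Nat.toDigits 10 m ++ acc := by
  induction m using Nat.strong_induction_on with
  | _ m ih =>
    intro f acc hf
    cases f with
    | zero => omega
    | succ f' =>
      rw [Nat.toDigitsCore]
      by_cases h0 : m / 10 = 0
      · simp only [h0, if_true]
        simp [Nat.toDigits, Nat.toDigitsCore, h0]
      · simp only [h0, if_false]
        have hlt : m / 10 < m := Nat.div_lt_self (by omega) (by omega)
        rw [ih (m / 10) hlt f' _ (by omega)]
        conv_rhs => rw [Nat.toDigits, Nat.toDigitsCore]
        simp only [h0, if_false]
        rw [ih (m / 10) hlt m _ (by omega)]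
        simp

lemma pv_toDigits_peel (m : Nat) (h : 10 ≤ m) :
    Nat.toDigits 10 m = Nat.toDigits 10 (m / 10) ++ [Nat.digitChar (m % 10)] := by
  rw [Nat.toDigits, Nat.toDigitsCore]
  have h0 : ¬ m / 10 = 0 := by omega
  simp only [h0, if_false]
  exact pv_toDigitsCore_eq (m / 10) m _ (by omega)

lemma pv_digitChar_toNat (k : Nat) (h : k < 10) : (Nat.digitChar k).toNat = k + 48 := by
  interval_cases k <;> decide

-- A's loop equals B's scan of the decimal digits, for positive numbers
lemma pv_key (m : Nat) (d : Int) (hm : 0 < m) :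
    pvLoopA (m : Int) d =
      (Nat.toDigits 10 m).any (fun ch => decide (((ch.toNat : Int) - 48) = d)) := by
  induction m using Nat.strong_induction_on with
  | _ m ih =>
    rw [pvLoopA]
    have hpos : ((m : Int) > 0) := by exact_mod_cast hm
    have hmodc : PySem.Int.mod (m : Int) 10 = ((m % 10 : Nat) : Int) := by
      rw [PySem.Int.mod_eq_emod_of_pos (by omega)]; omega
    have hdivc : PySem.Int.floordiv (m : Int) 10 = ((m / 10 : Nat) : Int) := by
      rw [PySem.Int.floordiv_eq_ediv_of_pos (by omega)]; omega
    simp only [hpos, dif_pos, hmodc, hdivc]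
    by_cases h10 : m < 10
    · have hdiv : m / 10 = 0 := by omega
      have hmod : m % 10 = m := by omega
      have hbase : Nat.toDigits 10 m = [Nat.digitChar (m % 10)] := by
        rw [Nat.toDigits, Nat.toDigitsCore]; simp [hdiv]
      rw [hbase, hdiv, hmod]
      by_cases hd : (m : Int) = d
      · simp [hd, pv_digitChar_toNat m h10]
      · simp only [hd, if_false]
        rw [pvLoopA]
        simp [pv_digitChar_toNat m h10]
        omega
    · rw [pv_toDigits_peel m (by omega)]
      have hrec := ih (m / 10) (Nat.div_lt_self hm (by omega)) (by omega)
      rw [List.any_append]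
      by_cases hd : ((m % 10 : Nat) : Int) = d
      · simp [hd, pv_digitChar_toNat (m % 10) (by omega)]
      · have hpc : decide ((((Nat.digitChar (m % 10)).toNat : Int) - 48) = d) = false := by
          simp [pv_digitChar_toNat (m % 10) (by omega)]
          omega
        simp only [hd, if_false, hrec, List.any_cons, List.any_nil, hpc, Bool.or_false]

-- ===== VERDICT (by name: the statement is the Claim_ definition above) =====
theorem doesContainDigit_spec : Claim_equal_doesContainDigit := by
  intro number digit _
  unfold Spec_doesContainDigit doesContainDigit doesContainDigit_alt
  by_cases hle : number ≤ 0
  · rw [pvLoopA]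
    simp [hle, show ¬ number > 0 by omega]
  · have hpos : 0 < number := by omega
    simp only [hle, if_false]
    rw [PySem.Int.toList_toStr, PySem.Int.toChars]
    simp only [show ¬ number < 0 by omega, if_false]
    obtain ⟨k, hk⟩ : ∃ k : Nat, number = (k : Int) := ⟨number.toNat, by omega⟩
    rw [hk, pv_key k digit (by omega), Int.toNat_natCast]
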